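-- pv_equiv track=rewrite | github.com/anitacaron/yrtt_entry_katas_python | tasks/exercise003.py | row_weights
-- ===== SOURCE A (Python) =====
-- def row_weights(array):
-- 	team1_w = 0
-- 	team2_w = 0
--
-- 	# team 1 take person in position even in the row and team 2 take person in position odd
-- 	for position, weight in enumerate(array):
-- 		if position % 2 == 0:
-- 			team1_w += weight
-- 		else:
-- 			team2_w += weight
--
-- 	return [team1_w,team2_w]
-- ===== SOURCE B (Python) =====
-- def row_weights(array):
-- 	team1 = 0
-- 	team2 = 0
-- 	i = 0
-- 	while i + 1 < len(array):
-- 		team1 += array[i]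
-- 		team2 += array[i + 1]
-- 		i += 2
-- 	if i < len(array):
-- 		team1 += array[i]
-- 	return [team1, team2]
-- ===== Notes on version B (the rewrite author's own statement) =====
-- stated objective: alternative
-- what changed: replaces the enumerate loop with an index-parity branch by an index-free pairwise pass that consumes two elements per step into two accumulators, never computing a position or a parity test
import Mathlib
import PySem

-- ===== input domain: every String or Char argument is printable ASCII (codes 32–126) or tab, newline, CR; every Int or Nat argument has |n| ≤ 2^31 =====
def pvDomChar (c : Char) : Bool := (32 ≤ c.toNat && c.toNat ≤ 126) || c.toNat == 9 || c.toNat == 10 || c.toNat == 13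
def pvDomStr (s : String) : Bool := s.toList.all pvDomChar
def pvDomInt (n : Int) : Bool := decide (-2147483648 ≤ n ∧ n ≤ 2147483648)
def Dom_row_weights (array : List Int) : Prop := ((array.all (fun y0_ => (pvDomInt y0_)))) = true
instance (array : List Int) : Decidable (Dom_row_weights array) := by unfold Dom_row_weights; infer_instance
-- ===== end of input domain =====

-- B replaces A's enumerate loop with its index-parity branch by an index-free pairwise
-- pass consuming two elements per step into two accumulators (objective: alternative).


-- ===== PORT A =====
-- for position, weight in enumerate(array): if position % 2 == 0 then team1 else team2
def row_weights (array : List Int) : List Int :=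
  let st := (PySem.List.enumerate array 0).foldl
    (fun (st : Int × Int) pw =>
      if PySem.Int.mod pw.1 2 == 0 then (st.1 + pw.2, st.2) else (st.1, st.2 + pw.2))
    (0, 0)
  [st.1, st.2]

-- ===== PORT B =====
-- the while loop: state (team1, team2, array[i:]); each iteration consumes array[i], array[i+1]
def rwGo : List Int → Int → Int → Int × Int
  | a :: b :: rest, t1, t2 => rwGo rest (t1 + a) (t2 + b)
  | [a], t1, t2 => (t1 + a, t2)       -- the trailing 'if i < len(array)' step
  | [], t1, t2 => (t1, t2)

def row_weights_alt (array : List Int) : List Int :=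
  let st := rwGo array 0 0
  [st.1, st.2]

-- ===== PRECONDITION & SPEC =====
def Spec_row_weights (array : List Int) (out : List Int) : Prop := out = row_weights_alt array
instance (array : List Int) (out : List Int) : Decidable (Spec_row_weights array out) := by unfold Spec_row_weights; infer_instance

-- ===== CLAIM (what is proved, stated in full; the proofs are below) =====
def Claim_equal_row_weights : Prop := ∀ (array : List Int), Dom_row_weights array → Spec_row_weights array (row_weights array)

-- ===== LEMMAS AND PROOFS =====

-- sums at even / odd positions, the common characterisation
mutual
def pvEsum : List Int → Int
  | [] => 0
  | a :: r => a + pvOsum r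
def pvOsum : List Int → Int
  | [] => 0
  | _ :: r => pvEsum r
end

lemma pvGo_char : ∀ (xs : List Int) (t1 t2 : Int), rwGo xs t1 t2 = (t1 + pvEsum xs, t2 + pvOsum xs)
  | [], t1, t2 => by simp [rwGo, pvEsum, pvOsum]
  | [a], t1, t2 => by simp [rwGo, pvEsum, pvOsum]
  | a :: b :: rest, t1, t2 => by
      rw [rwGo, pvGo_char rest]
      simp [pvEsum, pvOsum]
      constructor <;> ring

lemma pvB_char (xs : List Int) : row_weights_alt xs = [pvEsum xs, pvOsum xs] := by
  simp [row_weights_alt, pvGo_char]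

lemma pvA_fold (xs : List Int) : ∀ (k s t : Int), 0 ≤ k →
    (PySem.List.enumerate xs k).foldl
      (fun (st : Int × Int) pw =>
        if PySem.Int.mod pw.1 2 == 0 then (st.1 + pw.2, st.2) else (st.1, st.2 + pw.2))
      (s, t)
    = if k % 2 = 0 then (s + pvEsum xs, t + pvOsum xs) else (s + pvOsum xs, t + pvEsum xs) := by
  induction xs with
  | nil => intro k s t hk; simp [PySem.List.enumerate, pvEsum, pvOsum]
  | cons a r ih =>
      intro k s t hk
      have hmod : PySem.Int.mod k 2 = k % 2 := by
        simp [PySem.Int.mod, Int.fmod_eq_emod]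
      rw [PySem.List.enumerate_cons, List.foldl_cons]
      by_cases h : k % 2 = 0
      · have h1 : ¬ (k + 1) % 2 = 0 := by omega
        simp only [hmod, h]
        rw [if_pos (by decide), ih (k+1) (s+a) t (by omega), if_neg h1]
        simp only [if_true, pvEsum, pvOsum, Prod.mk.injEq]
        constructor <;> (first | trivial | ring)
      · have h1 : (k + 1) % 2 = 0 := by omega
        simp only [hmod]
        rw [if_neg (by simp [h]), ih (k+1) s (t+a) (by omega), if_pos h1, if_neg h]
        simp only [pvEsum, pvOsum, Prod.mk.injEq]
        constructor <;> (first | trivial | ring)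

-- ===== VERDICT (by name: the statement is the Claim_ definition above) =====
theorem row_weights_spec : Claim_equal_row_weights := by
  intro array _
  unfold Spec_row_weights row_weights
  rw [pvB_char, pvA_fold array 0 0 0 le_rfl]
  simp
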